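-- pv_equiv track=rewrite | github.com/StamTheo28/Fair-LTR-strategy | Fair-Ranking-LTR/population_stats.py | categorize_gender
-- ===== SOURCE A (Python) =====
-- def categorize_gender(gender_list):
--     man_gender_labels = ['male', 'cisgender male', 'transgender male', 'male organism', 'assigned male at birth']
--     woman_gender_labels = ['female', 'cisgender female', 'transgender female', 'assigned female at birth']
--     if gender_list:
--         genders = set()
--         for g in gender_list:
--             if g in man_gender_labels:
--                 genders.add('man')
--             elif g in woman_gender_labels:
--                 genders.add('woman')
--             else:
--                 return 'Non-binary'
--         if len(genders) > 1:
--             return 'Non-binary'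
--         elif 'man' in genders:
--             return 'Man'
--         elif 'woman' in genders:
--             return 'Woman'
--     return 'Unknown'
-- ===== SOURCE B (Python) =====
-- def categorize_gender(gender_list):
--     man = {'male', 'cisgender male', 'transgender male', 'male organism', 'assigned male at birth'}
--     woman = {'female', 'cisgender female', 'transgender female', 'assigned female at birth'}
--     if not gender_list:
--         return 'Unknown'
--     s = set(gender_list)
--     if not s <= (man | woman):
--         return 'Non-binary'
--     has_man = bool(s & man)
--     has_woman = bool(s & woman)
--     if has_man and has_woman:
--         return 'Non-binary'
--     return 'Man' if has_man else 'Woman'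
-- ===== Notes on version B (the rewrite author's own statement) =====
-- stated objective: idiomatic
-- what changed: Replaces the per-element loop with early exit and an accumulated marker set by whole-set operations: dedup the input once, test subset of the known labels, then test intersection with the man/woman label sets.
import Mathlib
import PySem

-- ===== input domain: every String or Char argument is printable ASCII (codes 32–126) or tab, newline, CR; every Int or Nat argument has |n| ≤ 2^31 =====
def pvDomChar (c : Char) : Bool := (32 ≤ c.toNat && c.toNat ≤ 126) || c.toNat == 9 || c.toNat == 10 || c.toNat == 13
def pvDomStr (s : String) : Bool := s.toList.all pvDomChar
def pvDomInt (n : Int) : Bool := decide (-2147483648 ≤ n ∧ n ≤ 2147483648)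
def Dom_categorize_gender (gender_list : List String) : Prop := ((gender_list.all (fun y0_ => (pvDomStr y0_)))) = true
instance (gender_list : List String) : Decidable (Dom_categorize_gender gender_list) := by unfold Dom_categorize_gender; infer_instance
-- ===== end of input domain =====

-- B replaces A's per-element loop (with early exit and a marker set) by whole-set
-- operations on the deduplicated input: subset and intersection tests; return value only.
-- ===== PORT A =====
def pvManLabels : List String :=
  ["male", "cisgender male", "transgender male", "male organism", "assigned male at birth"]

def pvWomanLabels : List String :=
  ["female", "cisgender female", "transgender female", "assigned female at birth"]

-- the for-loop of A: returns none where Python hits 'return 'Non-binary''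
def pvLoopA (xs : List String) (genders : PySem.Set String) : Option (PySem.Set String) :=
  match xs with
  | [] => some genders
  | g :: rest =>
    if g ∈ pvManLabels then pvLoopA rest (PySem.Set.add genders "man")
    else if g ∈ pvWomanLabels then pvLoopA rest (PySem.Set.add genders "woman")
    else none

def categorize_gender (gender_list : List String) : String :=
  if gender_list ≠ [] then
    match pvLoopA gender_list PySem.Set.empty with
    | none => "Non-binary"
    | some genders =>
      if PySem.Set.len genders > 1 then "Non-binary"
      else if "man" ∈ genders then "Man"
      else if "woman" ∈ genders then "Woman"
      else "Unknown"
  else "Unknown"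

-- ===== PORT B =====
def categorize_gender_alt (gender_list : List String) : String :=
  let man : PySem.Set String :=
    PySem.Set.ofList ["male", "cisgender male", "transgender male", "male organism", "assigned male at birth"]
  let woman : PySem.Set String :=
    PySem.Set.ofList ["female", "cisgender female", "transgender female", "assigned female at birth"]
  if gender_list = [] then "Unknown"
  else
    let s : PySem.Set String := PySem.Set.ofList gender_list
    if !(PySem.Set.issubset s (PySem.Set.union man woman)) then "Non-binary"
    else
      let hasMan : Bool := !(PySem.Set.inter s man).isEmpty
      let hasWoman : Bool := !(PySem.Set.inter s woman).isEmpty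
      if hasMan && hasWoman then "Non-binary"
      else if hasMan then "Man" else "Woman"

-- ===== PRECONDITION & SPEC =====
def Spec_categorize_gender (gender_list : List String) (out : String) : Prop := out = categorize_gender_alt gender_list
instance (gender_list : List String) (out : String) : Decidable (Spec_categorize_gender gender_list out) := by unfold Spec_categorize_gender; infer_instance

-- ===== CLAIM (what is proved, stated in full; the proofs are below) =====
def Claim_equal_categorize_gender : Prop := ∀ (gender_list : List String), Dom_categorize_gender gender_list → Spec_categorize_gender gender_list (categorize_gender gender_list)

-- ===== LEMMAS AND PROOFS =====

lemma pvLoopA_none (xs : List String) (genders : PySem.Set String) :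
    pvLoopA xs genders = none ↔ ∃ g ∈ xs, g ∉ pvManLabels ∧ g ∉ pvWomanLabels := by
  induction xs generalizing genders with
  | nil => simp [pvLoopA]
  | cons g rest ih =>
    simp only [pvLoopA]
    split_ifs with h1 h2 <;> simp_all

lemma pvLoopA_mem (xs : List String) (genders S : PySem.Set String)
    (h : pvLoopA xs genders = some S) (x : String) :
    x ∈ S ↔ x ∈ genders ∨ (x = "man" ∧ ∃ g ∈ xs, g ∈ pvManLabels)
      ∨ (x = "woman" ∧ ∃ g ∈ xs, g ∉ pvManLabels ∧ g ∈ pvWomanLabels) := by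
  induction xs generalizing genders with
  | nil =>
    simp only [pvLoopA, Option.some.injEq] at h
    subst h; simp
  | cons g rest ih =>
    simp only [pvLoopA] at h
    split_ifs at h with h1 h2
    · have := ih _ h
      rw [this, PySem.Set.mem_add]
      constructor
      · rintro ((hg | rfl) | ⟨rfl, hm⟩ | ⟨rfl, hw⟩)
        · exact Or.inl hg
        · exact Or.inr (Or.inl ⟨rfl, g, by simp [h1]⟩)
        · exact Or.inr (Or.inl ⟨rfl, hm.imp (fun a ha => ⟨List.mem_cons_of_mem _ ha.1, ha.2⟩)⟩)
        · exact Or.inr (Or.inr ⟨rfl, hw.imp (fun a ha => ⟨List.mem_cons_of_mem _ ha.1, ha.2⟩)⟩)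
      · rintro (hg | ⟨rfl, hm⟩ | ⟨rfl, ⟨a, ha, hna, hwa⟩⟩)
        · exact Or.inl (Or.inl hg)
        · exact Or.inl (Or.inr rfl)
        · rcases List.mem_cons.mp ha with rfl | ha'
          · exact absurd h1 hna
          · exact Or.inr (Or.inr ⟨rfl, a, ha', hna, hwa⟩)
    · have := ih _ h
      rw [this, PySem.Set.mem_add]
      constructor
      · rintro ((hg | rfl) | ⟨rfl, ⟨a, ha, hma⟩⟩ | ⟨rfl, hw⟩)
        · exact Or.inl hg
        · exact Or.inr (Or.inr ⟨rfl, g, by simp [h1, h2]⟩)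
        · exact Or.inr (Or.inl ⟨rfl, a, List.mem_cons_of_mem _ ha, hma⟩)
        · exact Or.inr (Or.inr ⟨rfl, hw.imp (fun a ha => ⟨List.mem_cons_of_mem _ ha.1, ha.2⟩)⟩)
      · rintro (hg | ⟨rfl, ⟨a, ha, hma⟩⟩ | ⟨rfl, ⟨a, ha, hna, hwa⟩⟩)
        · exact Or.inl (Or.inl hg)
        · rcases List.mem_cons.mp ha with rfl | ha'
          · exact absurd hma h1
          · exact Or.inr (Or.inl ⟨rfl, a, ha', hma⟩)
        · rcases List.mem_cons.mp ha with rfl | ha'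
          · exact Or.inl (Or.inr rfl)
          · exact Or.inr (Or.inr ⟨rfl, a, ha', hna, hwa⟩)

lemma pvLoopA_nodup (xs : List String) (genders S : PySem.Set String)
    (h : pvLoopA xs genders = some S) (hn : genders.Nodup) : S.Nodup := by
  induction xs generalizing genders with
  | nil => simp only [pvLoopA, Option.some.injEq] at h; subst h; exact hn
  | cons g rest ih =>
    simp only [pvLoopA] at h
    split_ifs at h
    · exact ih _ h (PySem.Set.nodup_add _ _ hn)
    · exact ih _ h (PySem.Set.nodup_add _ _ hn)

lemma pvTwoMem (S : List String) (hnd : S.Nodup)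
    (hsub : ∀ x ∈ S, x = "man" ∨ x = "woman") :
    PySem.Set.len S > 1 ↔ ("man" ∈ S ∧ "woman" ∈ S) := by
  match S with
  | [] => simp [PySem.Set.len]
  | [x] =>
    constructor
    · intro h; exfalso; simp [PySem.Set.len] at h
    · rintro ⟨h1, h2⟩
      rw [List.mem_singleton] at h1 h2
      exact absurd (h1.trans h2.symm) (by decide)
  | x :: y :: t =>
    have hx := hsub x (by simp)
    have hy := hsub y (by simp)
    have hxy : x ≠ y := by
      intro h; subst h; simp [List.Nodup] at hnd
    constructor
    · intro _
      rcases hx with rfl | rfl <;> rcases hy with rfl | rfl <;> simp_all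
    · intro _
      simp [PySem.Set.len]

lemma pvDisjoint : ∀ x ∈ pvWomanLabels, x ∉ pvManLabels := by decide

lemma pvExistsWoman (xs : List String) :
    (∃ g ∈ xs, g ∉ pvManLabels ∧ g ∈ pvWomanLabels) ↔ ∃ g ∈ xs, g ∈ pvWomanLabels := by
  constructor
  · rintro ⟨g, hg, _, hw⟩; exact ⟨g, hg, hw⟩
  · rintro ⟨g, hg, hw⟩; exact ⟨g, hg, pvDisjoint g hw, hw⟩

lemma pvInterNonempty (xs labels : List String) :
    (!(PySem.Set.inter (PySem.Set.ofList xs) (PySem.Set.ofList labels)).isEmpty) = true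
      ↔ ∃ g ∈ xs, g ∈ labels := by
  rw [Bool.not_eq_eq_eq_not, Bool.not_true, List.isEmpty_eq_false_iff_exists_mem]
  constructor
  · rintro ⟨a, ha⟩
    rw [PySem.Set.mem_inter, PySem.Set.mem_ofList, PySem.Set.mem_ofList] at ha
    exact ⟨a, ha.1, ha.2⟩
  · rintro ⟨g, hg, hl⟩
    exact ⟨g, by rw [PySem.Set.mem_inter, PySem.Set.mem_ofList, PySem.Set.mem_ofList]; exact ⟨hg, hl⟩⟩

-- ===== VERDICT (by name: the statement is the Claim_ definition above) =====
theorem categorize_gender_spec : Claim_equal_categorize_gender := by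
  intro gender_list _
  unfold Spec_categorize_gender categorize_gender categorize_gender_alt
  match hgl : gender_list with
  | [] => rfl
  | g0 :: rest =>
    simp only [ne_eq, reduceCtorEq, not_false_eq_true, if_true, if_false]
    rcases hloop : pvLoopA (g0 :: rest) PySem.Set.empty with _ | S
    · -- A returns Non-binary; some element is unknown, so B's subset test fails
      rw [pvLoopA_none] at hloop
      obtain ⟨g, hg, hnm, hnw⟩ := hloop
      have hsub : PySem.Set.issubset (PySem.Set.ofList (g0 :: rest))
          (PySem.Set.union (PySem.Set.ofList pvManLabels) (PySem.Set.ofList pvWomanLabels)) = false := by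
        rw [Bool.eq_false_iff]
        intro hc
        have := (PySem.Set.issubset_iff _ _).mp hc g ((PySem.Set.mem_ofList _ _).mpr hg)
        rw [PySem.Set.mem_union, PySem.Set.mem_ofList, PySem.Set.mem_ofList] at this
        tauto
      simp only [pvManLabels, pvWomanLabels] at hsub
      simp [hsub]
    · -- the loop finished: every element is a known label
      have hall : ∀ x ∈ (g0 :: rest), x ∈ pvManLabels ∨ x ∈ pvWomanLabels := by
        intro x hx
        by_contra hc
        rw [not_or] at hc
        have hn : pvLoopA (g0 :: rest) PySem.Set.empty = none :=
          (pvLoopA_none _ _).mpr ⟨x, hx, hc.1, hc.2⟩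
        rw [hn] at hloop
        simp at hloop
      have hsub : PySem.Set.issubset (PySem.Set.ofList (g0 :: rest))
          (PySem.Set.union (PySem.Set.ofList pvManLabels) (PySem.Set.ofList pvWomanLabels)) = true := by
        rw [PySem.Set.issubset_iff]
        intro x hx
        rw [PySem.Set.mem_ofList] at hx
        rw [PySem.Set.mem_union, PySem.Set.mem_ofList, PySem.Set.mem_ofList]
        exact hall x hx
      have hmem := pvLoopA_mem _ _ _ hloop
      have hnd : S.Nodup := pvLoopA_nodup _ _ _ hloop (by simp [PySem.Set.empty])
      have hman : ("man" ∈ S) ↔ ∃ g ∈ (g0 :: rest), g ∈ pvManLabels := by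
        rw [hmem "man"]; simp [PySem.Set.empty]
      have hwoman : ("woman" ∈ S) ↔ ∃ g ∈ (g0 :: rest), g ∈ pvWomanLabels := by
        rw [hmem "woman"]
        simp only [PySem.Set.empty, List.not_mem_nil, false_or]
        rw [pvExistsWoman]
        simp
      have hlen : PySem.Set.len S > 1 ↔ ("man" ∈ S ∧ "woman" ∈ S) := by
        apply pvTwoMem S hnd
        intro x hx
        rcases (hmem x).mp hx with h | ⟨h, _⟩ | ⟨h, _⟩
        · simp [PySem.Set.empty] at h
        · exact Or.inl h
        · exact Or.inr h
      have hM := pvInterNonempty (g0 :: rest) pvManLabels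
      have hW := pvInterNonempty (g0 :: rest) pvWomanLabels
      by_cases hpm : ∃ g ∈ (g0 :: rest), g ∈ pvManLabels
        <;> by_cases hpw : ∃ g ∈ (g0 :: rest), g ∈ pvWomanLabels
      · simp only [pvManLabels, pvWomanLabels] at hsub hM hW
        simp [hsub, hM.mpr hpm, hW.mpr hpw]
        intro hle
        exfalso
        have hgt := hlen.mpr ⟨hman.mpr hpm, hwoman.mpr hpw⟩
        simp only [PySem.Set.len] at hgt
        omega
      · have h1 : ¬ PySem.Set.len S > 1 := fun hc => hpw (hwoman.mp (hlen.mp hc).2)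
        have hWf : (!(PySem.Set.inter (PySem.Set.ofList (g0 :: rest)) (PySem.Set.ofList pvWomanLabels)).isEmpty) = false := by
          rw [Bool.eq_false_iff]; intro hc; exact hpw (hW.mp hc)
        simp only [pvManLabels, pvWomanLabels] at hsub hM hWf
        simp [hsub, hM.mpr hpm, hWf, hman.mpr hpm]
        simp only [PySem.Set.len] at h1
        omega
      · have h1 : ¬ PySem.Set.len S > 1 := fun hc => hpm (hman.mp (hlen.mp hc).1)
        have hMf : (!(PySem.Set.inter (PySem.Set.ofList (g0 :: rest)) (PySem.Set.ofList pvManLabels)).isEmpty) = false := by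
          rw [Bool.eq_false_iff]; intro hc; exact hpm (hM.mp hc)
        have hnm : "man" ∉ S := fun hc => hpm (hman.mp hc)
        simp only [pvManLabels, pvWomanLabels] at hsub hMf hW
        simp [hsub, hMf, hW.mpr hpw, hnm, hwoman.mpr hpw]
        simp only [PySem.Set.len] at h1
        omega
      · exfalso
        rcases hall g0 (by simp) with h | h
        · exact hpm ⟨g0, by simp, h⟩
        · exact hpw ⟨g0, by simp, h⟩
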